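-- pv_equiv track=rewrite | github.com/rohan-dot/Rasa-NLU | bioasq_agentic-1.py | _snippets_block
-- ===== SOURCE A (Python) =====
-- def _snippets_block(snippets: list[str], max_chars: int = 4000) -> str:
--     block = ""
--     for i, s in enumerate(snippets, 1):
--         line = f"[{i}] {s.strip()}\n"
--         if len(block) + len(line) > max_chars:
--             break
--         block += line
--     return block.strip()
-- ===== SOURCE B (Python) =====
-- def _snippets_block(snippets: list[str], max_chars: int = 4000) -> str:
--     lines = [f"[{i}] {s.strip()}\n" for i, s in enumerate(snippets, 1)]
--     k = 0
--     total = 0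
--     for line in lines:
--         total += len(line)
--         if total > max_chars:
--             break
--         k += 1
--     return "".join(lines[:k]).strip()
-- ===== Notes on version B (the rewrite author's own statement) =====
-- stated objective: alternative
-- what changed: B first builds the full list of formatted lines, then finds the cutoff k as the longest prefix whose cumulative length stays within max_chars, and joins that prefix once, instead of A's incremental concat-and-break accumulation of a growing string.
import Mathlib
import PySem

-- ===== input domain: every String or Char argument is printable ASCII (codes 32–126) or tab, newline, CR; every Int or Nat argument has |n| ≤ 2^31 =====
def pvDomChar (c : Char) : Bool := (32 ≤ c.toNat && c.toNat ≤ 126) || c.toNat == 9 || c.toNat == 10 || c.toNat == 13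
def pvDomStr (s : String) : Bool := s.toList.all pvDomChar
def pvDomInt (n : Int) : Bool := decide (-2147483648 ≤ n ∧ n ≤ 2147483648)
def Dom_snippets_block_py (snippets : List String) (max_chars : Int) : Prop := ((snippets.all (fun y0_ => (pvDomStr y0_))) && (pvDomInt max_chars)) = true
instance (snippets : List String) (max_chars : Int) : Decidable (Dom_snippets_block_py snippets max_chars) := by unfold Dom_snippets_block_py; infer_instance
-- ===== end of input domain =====

-- B builds all formatted lines first, finds the cutoff prefix within the budget, and joins once;
-- A accumulates a growing string and breaks mid-loop. Equivalence of the return values is proved.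

-- the f-string f"[{i}] {s.strip()}\n", shared by both sources, on List Char
def pvFmt (i : Int) (s : String) : List Char :=
  "[".toList ++ PySem.Int.toChars i ++ "] ".toList ++ PySem.Chars.strip s.toList ++ "\n".toList

-- ===== PORT A =====
-- A's loop: state (index i, accumulated block), break when the block would exceed max_chars
def pvGoA (mc : Int) : List String → Int → List Char → List Char
  | [], _, block => block
  | s :: rest, i, block =>
    let line := pvFmt i s
    if PySem.Chars.len block + PySem.Chars.len line > mc then block
    else pvGoA mc rest (i + 1) (block ++ line)

def snippets_block_py (snippets : List String) (max_chars : Int) : String :=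
  String.ofList (PySem.Chars.strip (pvGoA max_chars snippets 1 []))

-- ===== PORT B =====
-- B's lines = [f"[{i}] {s.strip()}\n" for i, s in enumerate(snippets, 1)]
def pvLinesB (snippets : List String) : List (List Char) :=
  (PySem.List.enumerate snippets 1).map (fun p => pvFmt p.1 p.2)

-- B's cutoff loop: k = number of leading lines whose running total stays ≤ max_chars
def pvCutoff (mc : Int) : List (List Char) → Int → Nat
  | [], _ => 0
  | l :: rest, total =>
    if total + PySem.Chars.len l > mc then 0
    else 1 + pvCutoff mc rest (total + PySem.Chars.len l)

def snippets_block_py_alt (snippets : List String) (max_chars : Int) : String :=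
  let lines := pvLinesB snippets
  String.ofList (PySem.Chars.strip ((lines.take (pvCutoff max_chars lines 0)).flatten))

-- ===== PRECONDITION & SPEC =====
def Spec_snippets_block_py (snippets : List String) (max_chars : Int) (out : String) : Prop := out = snippets_block_py_alt snippets max_chars
instance (snippets : List String) (max_chars : Int) (out : String) : Decidable (Spec_snippets_block_py snippets max_chars out) := by unfold Spec_snippets_block_py; infer_instance

-- ===== CLAIM (what is proved, stated in full; the proofs are below) =====
def Claim_equal_snippets_block_py : Prop := ∀ (snippets : List String) (max_chars : Int), Dom_snippets_block_py snippets max_chars → Spec_snippets_block_py snippets max_chars (snippets_block_py snippets max_chars)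

-- ===== LEMMAS AND PROOFS =====

theorem pvGoA_eq (mc : Int) (l : List String) : ∀ (i : Int) (acc : List Char),
    pvGoA mc l i acc =
      acc ++ (let ls := (PySem.List.enumerate l i).map (fun p => pvFmt p.1 p.2);
              (ls.take (pvCutoff mc ls (PySem.Chars.len acc))).flatten) := by
  induction l with
  | nil => intro i acc; simp [pvGoA, PySem.List.enumerate_nil, pvCutoff]
  | cons s rest ih =>
    intro i acc
    simp only [PySem.List.enumerate_cons, List.map_cons, pvGoA, pvCutoff, PySem.Chars.len_eq]
    by_cases h : mc < (acc.length : Int) + ((pvFmt i s).length : Int)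
    · simp [h]
    · rw [if_neg h, if_neg h, ih (i + 1) (acc ++ pvFmt i s)]
      have hlen : ((acc ++ pvFmt i s).length : Int) =
          (acc.length : Int) + ((pvFmt i s).length : Int) := by
        simp
      simp only [PySem.Chars.len_eq, hlen]
      have hk : 1 + pvCutoff mc (List.map (fun p => pvFmt p.1 p.2) (PySem.List.enumerate rest (i + 1)))
          ((acc.length : Int) + ((pvFmt i s).length : Int)) =
          (pvCutoff mc (List.map (fun p => pvFmt p.1 p.2) (PySem.List.enumerate rest (i + 1)))
          ((acc.length : Int) + ((pvFmt i s).length : Int))) + 1 := Nat.add_comm _ _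
      rw [hk, List.take_succ_cons, List.flatten_cons, List.append_assoc]

theorem snippets_block_py_spec : Claim_equal_snippets_block_py := by
  intro snippets max_chars _
  unfold Spec_snippets_block_py snippets_block_py snippets_block_py_alt pvLinesB
  rw [pvGoA_eq]
  simp [PySem.Chars.len]
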